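-- pv_equiv track=rewrite | github.com/par3k/Algorithm-Codingtest | Programmers/더 맵게.py | solution
-- ===== SOURCE A (Python) =====
-- import heapq
--
-- def solution(scoville, K):
--     answer = 0
--     queue = []
--
--     for i in scoville:
--         heapq.heappush(queue, i)
--
--     while queue:
--         if queue[0] >= K:
--             return answer
--         if len(queue) == 1 and queue[0] < K:
--             return -1
--         first = heapq.heappop(queue)
--         second = heapq.heappop(queue)
--         heapq.heappush(queue, first + second * 2)
--         answer += 1
-- ===== SOURCE B (Python) =====
-- def _insort(arr, x):
--     # insert x into sorted arr, keeping it sorted (left scan)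
--     i = 0
--     while i < len(arr) and arr[i] <= x:
--         i += 1
--     arr.insert(i, x)
--
--
-- def solution(scoville, K):
--     arr = sorted(scoville)
--     answer = 0
--     while arr:
--         if arr[0] >= K:
--             return answer
--         if len(arr) == 1:
--             return -1
--         first = arr.pop(0)
--         second = arr.pop(0)
--         _insort(arr, first + second * 2)
--         answer += 1
-- ===== Notes on version B (the rewrite author's own statement) =====
-- stated objective: alternative
-- what changed: Replaces the binary heap with a sorted list: sort once up front, pop the two smallest from the front and re-insert the mix by ordered insertion, instead of heap push/pop with sift operations.
import Mathlib
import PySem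

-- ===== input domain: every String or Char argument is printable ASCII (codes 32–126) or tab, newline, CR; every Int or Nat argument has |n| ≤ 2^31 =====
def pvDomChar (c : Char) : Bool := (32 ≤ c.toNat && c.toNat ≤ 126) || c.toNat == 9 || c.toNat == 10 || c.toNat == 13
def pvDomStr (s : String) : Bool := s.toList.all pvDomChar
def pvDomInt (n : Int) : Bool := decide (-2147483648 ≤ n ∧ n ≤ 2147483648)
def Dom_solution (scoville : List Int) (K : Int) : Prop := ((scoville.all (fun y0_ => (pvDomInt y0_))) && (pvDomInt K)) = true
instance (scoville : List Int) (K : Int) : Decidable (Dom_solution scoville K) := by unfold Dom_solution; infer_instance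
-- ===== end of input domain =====

-- B replaces A's binary heap with a sorted list (sort once, pop the two smallest from the
-- front, ordered re-insertion of the mix); return values proved equal for non-empty input.

-- ===== PORT A =====
-- heapq's queue is ported as a binary min-heap over Tree Int (exact on everything A
-- observes: queue[0] is the minimum, heappop removes the minimum, heappush adds an element).

def pvHSize : Tree Int → Nat
  | .nil => 0
  | .node _ l r => 1 + pvHSize l + pvHSize r

def pvHToList : Tree Int → List Int
  | .nil => []
  | .node v l r => v :: (pvHToList l ++ pvHToList r)

-- heappush: keep the smaller value at the root, insert the larger into a child, swap children
def pvHPush : Tree Int → Int → Tree Int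
  | .nil, x => .node x .nil .nil
  | .node v l r, x =>
      if x ≤ v then .node x (pvHPush r v) l else .node v (pvHPush r x) l

-- remaining heap after heappop: meld the two children (re-inserting one child's values)
def pvHMeld (l r : Tree Int) : Tree Int := (pvHToList l).foldl pvHPush r

def pvHPeek : Tree Int → Int
  | .nil => 0
  | .node v _ _ => v

def pvHRest : Tree Int → Tree Int
  | .nil => .nil
  | .node _ l r => pvHMeld l r

theorem pvHPush_size (h : Tree Int) (x : Int) : pvHSize (pvHPush h x) = pvHSize h + 1 := by
  induction h generalizing x with
  | nil => rfl
  | node v l r ihl ihr => simp only [pvHPush]; split <;> simp [pvHSize, ihr] <;> omega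

theorem pvFoldl_push_size (xs : List Int) : ∀ (q : Tree Int),
    pvHSize (xs.foldl pvHPush q) = pvHSize q + xs.length := by
  induction xs with
  | nil => intro q; simp
  | cons x rest ih => intro q; simp [List.foldl, ih, pvHPush_size]; omega

theorem pvHToList_length (h : Tree Int) : (pvHToList h).length = pvHSize h := by
  induction h with
  | nil => rfl
  | node v l r ihl ihr => simp [pvHToList, pvHSize, ihl, ihr]; omega

theorem pvHMeld_size (l r : Tree Int) : pvHSize (pvHMeld l r) = pvHSize l + pvHSize r := by
  simp only [pvHMeld, pvFoldl_push_size, pvHToList_length]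
  omega

theorem pvHRest_size (q : Tree Int) : pvHSize (pvHRest q) = pvHSize q - 1 := by
  cases q with
  | nil => rfl
  | node v l r => simp [pvHRest, pvHMeld_size, pvHSize]; omega

theorem pvLoopA_dec {K v : Int} {l r : Tree Int} {x : Int}
    (h1 : ¬ v ≥ K) (h2 : ¬(pvHSize (Tree.node v l r) = 1 ∧ v < K)) :
    pvHSize (pvHPush (pvHRest (pvHMeld l r)) x) < pvHSize (Tree.node v l r) := by
  have hm := pvHRest_size (pvHMeld l r)
  rw [pvHMeld_size] at hm
  rw [pvHPush_size, hm]
  simp only [pvHSize] at *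
  omega

-- the while loop of A: guards in A's order, then pop twice, push the mix, answer += 1
def pvLoopA (K : Int) : Tree Int → Int → Int
  | .nil, _ => 0        -- unreachable: Python returns None only on empty input (outside Pre_)
  | .node v l r, ans =>
      if h1 : v ≥ K then ans
      else if h2 : pvHSize (Tree.node v l r) = 1 ∧ v < K then -1
      else
        -- first = heappop (= v), second = heappop (= peek of the remainder)
        let q1 := pvHMeld l r
        pvLoopA K (pvHPush (pvHRest q1) (v + pvHPeek q1 * 2)) (ans + 1)
termination_by q _ => pvHSize q
decreasing_by exact pvLoopA_dec h1 h2

def solution (scoville : List Int) (K : Int) : Int :=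
  pvLoopA K (scoville.foldl pvHPush Tree.nil) 0

-- ===== PORT B =====
-- _insort from Source B: ordered insertion into a sorted list (left scan)
def pvInsort : List Int → Int → List Int
  | [], x => [x]
  | a :: rest, x => if a ≤ x then a :: pvInsort rest x else x :: a :: rest

theorem pvInsort_length (arr : List Int) (x : Int) :
    (pvInsort arr x).length = arr.length + 1 := by
  induction arr with
  | nil => rfl
  | cons a rest ih => simp only [pvInsort]; split <;> simp [ih]

theorem pvLoopB_dec (rest2 : List Int) (x a b : Int) :
    (pvInsort rest2 x).length < (a :: b :: rest2).length := by
  simp [pvInsort_length]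

-- the while loop of B: guard, singleton check, pop two from the front, ordered insert
def pvLoopB (K : Int) : List Int → Int → Int
  | [], _ => 0          -- unreachable: Python returns None only on empty input (outside Pre_)
  | a :: rest, ans =>
      if a ≥ K then ans
      else
        match rest with
        | [] => -1
        | b :: rest2 => pvLoopB K (pvInsort rest2 (a + b * 2)) (ans + 1)
termination_by arr _ => arr.length
decreasing_by exact pvLoopB_dec _ _ _ _

def solution_alt (scoville : List Int) (K : Int) : Int :=
  pvLoopB K (PySem.List.sorted scoville (fun x => x) false) 0

-- ===== PRECONDITION & SPEC =====
-- Pre_ excludes only the empty list, on which Python A falls through its loop and returns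
-- None, not an int (B does the same there).
def Pre_solution (scoville : List Int) (K : Int) : Prop := scoville ≠ []
instance (scoville : List Int) (K : Int) : Decidable (Pre_solution scoville K) := by
  unfold Pre_solution; infer_instance

def pvWitness_solution : List Int × Int := ([1, 2, 3, 9, 10, 12], 7)

def Spec_solution (scoville : List Int) (K : Int) (out : Int) : Prop := out = solution_alt scoville K
instance (scoville : List Int) (K : Int) (out : Int) : Decidable (Spec_solution scoville K out) := by
  unfold Spec_solution; infer_instance

-- ===== CLAIM (what is proved, stated in full; the proofs are below) =====
def Claim_equal_solution : Prop := ∀ (scoville : List Int) (K : Int), Dom_solution scoville K → Pre_solution scoville K → Spec_solution scoville K (solution scoville K)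

-- ===== LEMMAS AND PROOFS =====

def PvIsHeap : Tree Int → Prop
  | .nil => True
  | .node v l r => (∀ x ∈ pvHToList l, v ≤ x) ∧ (∀ x ∈ pvHToList r, v ≤ x) ∧ PvIsHeap l ∧ PvIsHeap r

def pvHMset : Tree Int → Multiset Int
  | .nil => 0
  | .node v l r => v ::ₘ (pvHMset l + pvHMset r)

theorem pvHCoe_toList (h : Tree Int) : (↑(pvHToList h) : Multiset Int) = pvHMset h := by
  induction h with
  | nil => rfl
  | node v l r ihl ihr =>
      simp only [pvHToList, pvHMset, ← ihl, ← ihr]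
      rfl

theorem pvHPush_mset (h : Tree Int) (x : Int) : pvHMset (pvHPush h x) = x ::ₘ pvHMset h := by
  induction h generalizing x with
  | nil => rfl
  | node v l r ihl ihr =>
      simp only [pvHPush]
      split
      · simp only [pvHMset, ihr, ← Multiset.singleton_add]; abel
      · simp only [pvHMset, ihr, ← Multiset.singleton_add]; abel

theorem pvHPush_toList_perm (h : Tree Int) (x : Int) :
    (pvHToList (pvHPush h x)).Perm (x :: pvHToList h) := by
  rw [← Multiset.coe_eq_coe, pvHCoe_toList, pvHPush_mset, ← Multiset.cons_coe, pvHCoe_toList]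

theorem pvHPush_isHeap {h : Tree Int} (x : Int) (H : PvIsHeap h) : PvIsHeap (pvHPush h x) := by
  induction h generalizing x with
  | nil => exact ⟨by simp [pvHToList], by simp [pvHToList], trivial, trivial⟩
  | node v l r ihl ihr =>
      obtain ⟨hl, hr, Hl, Hr⟩ := H
      simp only [pvHPush]
      split
      · rename_i hxv
        refine ⟨?_, fun y hy => le_trans hxv (hl y hy), ihr v Hr, Hl⟩
        intro y hy
        rcases List.mem_cons.mp ((pvHPush_toList_perm r v).mem_iff.mp hy) with rfl | hy'
        · exact hxv
        · exact le_trans hxv (hr y hy')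
      · rename_i hxv
        refine ⟨?_, hl, ihr x Hr, Hl⟩
        intro y hy
        rcases List.mem_cons.mp ((pvHPush_toList_perm r x).mem_iff.mp hy) with rfl | hy'
        · omega
        · exact hr y hy'

theorem pvFoldl_push_mset (xs : List Int) : ∀ (q : Tree Int),
    pvHMset (xs.foldl pvHPush q) = pvHMset q + ↑xs := by
  induction xs with
  | nil => intro q; simp
  | cons x rest ih =>
      intro q
      simp only [List.foldl, ih, pvHPush_mset, ← Multiset.cons_coe, ← Multiset.singleton_add]
      abel

theorem pvFoldl_push_isHeap (xs : List Int) : ∀ (q : Tree Int), PvIsHeap q →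
    PvIsHeap (xs.foldl pvHPush q) := by
  induction xs with
  | nil => intro q h; exact h
  | cons x rest ih => intro q h; exact ih _ (pvHPush_isHeap x h)

theorem pvHMeld_mset (l r : Tree Int) : pvHMset (pvHMeld l r) = pvHMset l + pvHMset r := by
  rw [pvHMeld, pvFoldl_push_mset, pvHCoe_toList]
  abel

theorem pvHMeld_toList_perm (l r : Tree Int) :
    (pvHToList (pvHMeld l r)).Perm (pvHToList l ++ pvHToList r) := by
  rw [← Multiset.coe_eq_coe, ← Multiset.coe_add, pvHCoe_toList, pvHCoe_toList, pvHCoe_toList,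
    pvHMeld_mset]

theorem pvHMeld_isHeap {l r : Tree Int} (_Hl : PvIsHeap l) (Hr : PvIsHeap r) :
    PvIsHeap (pvHMeld l r) := pvFoldl_push_isHeap (pvHToList l) r Hr

theorem pvHRoot_le {v : Int} {l r : Tree Int} (H : PvIsHeap (Tree.node v l r)) :
    ∀ x ∈ pvHToList (Tree.node v l r), v ≤ x := by
  obtain ⟨hl, hr, _, _⟩ := H
  intro x hx
  simp only [pvHToList, List.mem_cons, List.mem_append] at hx
  rcases hx with h | h | h
  · omega
  · exact hl x h
  · exact hr x h

theorem pvInsort_perm (arr : List Int) (x : Int) : (pvInsort arr x).Perm (x :: arr) := by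
  induction arr with
  | nil => rfl
  | cons a rest ih =>
      simp only [pvInsort]
      split
      · exact (ih.cons a).trans (List.Perm.swap x a rest)
      · rfl

theorem pvInsort_sorted {arr : List Int} (x : Int) (hs : arr.Pairwise (· ≤ ·)) :
    (pvInsort arr x).Pairwise (· ≤ ·) := by
  induction arr with
  | nil => simp [pvInsort]
  | cons a rest ih =>
      rw [List.pairwise_cons] at hs
      obtain ⟨ha, hrest⟩ := hs
      simp only [pvInsort]
      split
      · rename_i hax
        rw [List.pairwise_cons]
        refine ⟨?_, ih hrest⟩
        intro y hy
        rcases List.mem_cons.mp ((pvInsort_perm rest x).mem_iff.mp hy) with rfl | h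
        · exact hax
        · exact ha y h
      · rename_i hax
        rw [List.pairwise_cons]
        refine ⟨?_, List.pairwise_cons.mpr ⟨ha, hrest⟩⟩
        intro y hy
        rcases List.mem_cons.mp hy with rfl | h
        · omega
        · exact le_trans (by omega) (ha y h)

theorem pvLoop_eq (K : Int) : ∀ (n : Nat) (q : Tree Int) (arr : List Int) (ans : Int),
    pvHSize q = n → PvIsHeap q → (pvHToList q).Perm arr → arr.Pairwise (· ≤ ·) →
    pvLoopA K q ans = pvLoopB K arr ans := by
  intro n
  induction n using Nat.strong_induction_on with
  | _ n ih =>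
    intro q arr ans hsz hheap hperm hsort
    match q with
    | .nil =>
        have harr : arr = [] := by
          have hlen := hperm.length_eq
          simp [pvHToList] at hlen
          exact List.eq_nil_of_length_eq_zero hlen.symm
        subst harr
        simp [pvLoopA, pvLoopB]
    | .node v l r =>
        cases arr with
        | nil =>
            exact absurd hperm.length_eq (by simp [pvHToList])
        | cons a rest =>
          have hva : a = v := by
            have h1 : v ≤ a := pvHRoot_le hheap a (hperm.mem_iff.mpr (by simp))
            have h2 : a ≤ v := by
              have hv : v ∈ a :: rest := hperm.mem_iff.mp (by simp [pvHToList])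
              rcases List.mem_cons.mp hv with rfl | h
              · exact le_refl v
              · exact (List.pairwise_cons.mp hsort).1 v h
            omega
          subst hva
          rw [pvLoopA, pvLoopB.eq_def]
          by_cases hK : a ≥ K
          · simp [hK]
          · simp only [hK]
            cases rest with
            | nil =>
                have hs1 : pvHSize (Tree.node a l r) = 1 := by
                  rw [← pvHToList_length, hperm.length_eq]
                  rfl
                simp [hs1, lt_of_not_ge hK]
            | cons b rest2 =>
                have hlen : pvHSize (Tree.node a l r) = rest2.length + 2 := by
                  rw [← pvHToList_length, hperm.length_eq]; simp
                have hguard : ¬(pvHSize (Tree.node a l r) = 1 ∧ a < K) := by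
                  intro hc; omega
                simp only [hguard]
                have hmp : (pvHToList (pvHMeld l r)).Perm (b :: rest2) := by
                  have h0 : (pvHToList (Tree.node a l r)).Perm (a :: b :: rest2) := hperm
                  have h1 : (pvHToList l ++ pvHToList r).Perm (b :: rest2) := h0.cons_inv
                  exact (pvHMeld_toList_perm l r).trans h1
                rcases hm : pvHMeld l r with _ | ⟨v2, l2, r2⟩
                · rw [hm] at hmp
                  exact absurd hmp.length_eq (by simp [pvHToList])
                · rw [hm] at hmp
                  have hheap2 : PvIsHeap (Tree.node v2 l2 r2) := by
                    rw [← hm]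
                    exact pvHMeld_isHeap hheap.2.2.1 hheap.2.2.2
                  have hsort1 : (b :: rest2).Pairwise (· ≤ ·) := (List.pairwise_cons.mp hsort).2
                  have hv2b : v2 = b := by
                    have h1 : v2 ≤ b := pvHRoot_le hheap2 b (hmp.mem_iff.mpr (by simp))
                    have h2 : b ≤ v2 := by
                      have hv2 : v2 ∈ b :: rest2 := hmp.mem_iff.mp (by simp [pvHToList])
                      rcases List.mem_cons.mp hv2 with rfl | h
                      · exact le_refl _
                      · exact (List.pairwise_cons.mp hsort1).1 v2 h
                    omega
                  subst hv2b
                  simp only [pvHRest, pvHPeek]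
                  set x := a + v2 * 2 with hx
                  have hpermQ : (pvHToList (pvHPush (pvHMeld l2 r2) x)).Perm
                      (pvInsort rest2 x) := by
                    have h1 : (pvHToList (pvHPush (pvHMeld l2 r2) x)).Perm
                        (x :: (pvHToList l2 ++ pvHToList r2)) :=
                      (pvHPush_toList_perm _ x).trans ((pvHMeld_toList_perm l2 r2).cons x)
                    have h2 : (pvHToList l2 ++ pvHToList r2).Perm rest2 := hmp.cons_inv
                    exact (h1.trans (h2.cons x)).trans (pvInsort_perm rest2 x).symm
                  have hheapQ : PvIsHeap (pvHPush (pvHMeld l2 r2) x) :=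
                    pvHPush_isHeap x (pvHMeld_isHeap hheap2.2.2.1 hheap2.2.2.2)
                  have hsortQ : (pvInsort rest2 x).Pairwise (· ≤ ·) :=
                    pvInsort_sorted x (List.pairwise_cons.mp hsort1).2
                  have hszQ : pvHSize (pvHPush (pvHMeld l2 r2) x) < n := by
                    rw [pvHPush_size, pvHMeld_size]
                    have e1 := pvHMeld_size l r
                    rw [hm] at e1
                    simp only [pvHSize] at *
                    omega
                  exact ih _ hszQ _ _ (ans + 1) rfl hheapQ hpermQ hsortQ

theorem pvFoldl_push_toList_perm (xs : List Int) (q : Tree Int) :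
    (pvHToList (xs.foldl pvHPush q)).Perm (pvHToList q ++ xs) := by
  rw [← Multiset.coe_eq_coe, pvHCoe_toList, pvFoldl_push_mset, ← Multiset.coe_add, pvHCoe_toList]

-- ===== VERDICT (by name: the statement is the Claim_ definition above) =====
theorem solution_spec : Claim_equal_solution := by
  intro scoville K _hdom _hpre
  unfold Spec_solution solution solution_alt
  refine pvLoop_eq K _ _ _ 0 rfl (pvFoldl_push_isHeap scoville .nil trivial) ?_ ?_
  · refine (pvFoldl_push_toList_perm scoville .nil).trans ?_
    simpa [pvHToList] using (PySem.List.sorted_perm scoville (fun x => x) false).symm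
  · simpa using PySem.List.sorted_pairwise scoville (fun x => x)
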